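-- pv_equiv track=rewrite | github.com/Sathishr424/Leetcode-Challenges | Tap Code Translation.py | tap_code
-- ===== SOURCE A (Python) =====
-- def checkCnt(x,c):
-- 	ret = 0
-- 	for i in range(c,len(x)):
-- 		if x[i] == '.':
-- 			ret+=1
-- 		else:
-- 			return ret
-- 	return ret
--
-- def getDot(x):
-- 	if x == 'k': x='c'
-- 	for i in range(len(grid)):
-- 		for j in range(len(grid[i])):
-- 			if grid[i][j] == x:
-- 				return (i+1)*'.' + ' ' + (j+1)*'.' + ' '
--
-- def tap_code(text):
-- 	ret = ''
-- 	if text[0] == '.':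
-- 		cnt = 0
-- 		word = [-1,-1]
-- 		while True:
-- 			if word[0] == -1:
-- 				word[0] = checkCnt(text,cnt)
-- 				cnt += word[0]+1
-- 			elif word[1] == -1:
-- 				word[1] = checkCnt(text,cnt)
-- 				cnt += word[1]+1
-- 			else:
-- 				ret += grid[word[0]-1][word[1]-1]
-- 				word = [-1,-1]
-- 				if cnt >= len(text): break
-- 		return ret
-- 	else:
-- 		for i in text:
-- 			ret+=getDot(i)
-- 		return ret[:-1]
--
-- grid = [['a','b','c','d','e'],['f','g','h','i','j'],['l','m','n','o','p'],['q','r','s','t','u'],['v','w','x','y','z']]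
-- ===== SOURCE B (Python) =====
-- ALPHABET = "abcdefghijlmnopqrstuvwxyz"  # 5x5 tap-code square, row-major ('k' is sent as 'c')
--
--
-- def _decode(runs):
--     if not runs:
--         return ''
--     row, col, rest = runs[0], runs[1], runs[2:]
--     return ALPHABET[5 * (len(row) - 1) + len(col) - 1] + _decode(rest)
--
--
-- def tap_code(text):
--     if text[0] == '.':
--         # normalise every separator to a space, then split into dot groups
--         runs = ''.join(c if c == '.' else ' ' for c in text).split()
--         return _decode(runs)
--     codes = {ALPHABET[5 * r + c]: '.' * (r + 1) + ' ' + '.' * (c + 1)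
--              for r in range(5) for c in range(5)}
--     codes['k'] = codes['c']
--     return ' '.join(codes[ch] for ch in text)
-- ===== Notes on version B (the rewrite author's own statement) =====
-- stated objective: faster
-- what changed: Decode normalises every separator to a space, splits the string into dot groups with str.split, and consumes the group list by structural recursion two at a time; encode uses a letter-to-code dict built by arithmetic comprehension and ' '.join instead of A's per-character nested grid scan with string concatenation; …
-- outside the precondition, e.g. on tap_code('..'): A returns 'j', B raises IndexError; on tap_code('.  .'): A returns 'ee', B returns 'a'; on tap_code('Hi'): A raises TypeError, B raises KeyError
import Mathlib
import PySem

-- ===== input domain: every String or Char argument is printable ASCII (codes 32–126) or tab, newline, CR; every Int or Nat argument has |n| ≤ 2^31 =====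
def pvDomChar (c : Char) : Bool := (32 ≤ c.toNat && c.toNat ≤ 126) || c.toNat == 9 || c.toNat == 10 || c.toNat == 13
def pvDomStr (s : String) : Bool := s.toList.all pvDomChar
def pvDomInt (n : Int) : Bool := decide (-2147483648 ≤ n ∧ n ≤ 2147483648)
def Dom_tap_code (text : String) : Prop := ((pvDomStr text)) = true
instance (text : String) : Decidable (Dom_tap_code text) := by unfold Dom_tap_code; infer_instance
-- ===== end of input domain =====

-- B decodes by normalising separators to spaces, splitting into dot groups and consuming the
-- group list recursively two at a time, and encodes via a letter→code table joined by ' '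
-- (alternative decomposition of A's index-walking sentinel loop and nested grid scan).

-- ===== PORT A =====

def gridA : List (List Char) :=
  [['a','b','c','d','e'],['f','g','h','i','j'],['l','m','n','o','p'],
   ['q','r','s','t','u'],['v','w','x','y','z']]

-- checkCnt: count '.' from index c, early return on the first non-dot
def checkCntAux (x : List Char) : List Int → Int → Int
  | [], ret => ret
  | i :: is, ret =>
      if PySem.List.pyGet? x i = some '.' then checkCntAux x is (ret + 1) else ret

def checkCnt (x : List Char) (c : Int) : Int :=
  checkCntAux x (PySem.List.pyRange c (PySem.List.len x) 1) 0

theorem checkCntAux_ge (x : List Char) (is : List Int) (ret : Int) :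
    ret ≤ checkCntAux x is ret := by
  induction is generalizing ret with
  | nil => simp [checkCntAux]
  | cons i is ih =>
      simp only [checkCntAux]
      split
      · have := ih (ret + 1); omega
      · omega

theorem checkCnt_nonneg (x : List Char) (c : Int) : 0 ≤ checkCnt x c :=
  checkCntAux_ge x _ 0

-- grid[w0-1][w1-1] via Python (possibly negative) indexing; '?' is unreachable under Pre_
def letterA (r c : Int) : Char :=
  ((PySem.List.pyGet? gridA (r - 1)).bind
      (fun row => PySem.List.pyGet? row (c - 1))).getD '?'

-- A's decode while-loop, unrolled per (row, col) pair: w0 = checkCnt at cnt,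
-- w1 = checkCnt at cnt + w0 + 1, then append grid[w0-1][w1-1] and loop at cnt + w0 + w1 + 2
def decodeA (x : List Char) (cnt : Int) (ret : List Char) : List Char :=
  if PySem.List.len x ≤ cnt + checkCnt x cnt + 1 + checkCnt x (cnt + checkCnt x cnt + 1) + 1 then
    ret ++ [letterA (checkCnt x cnt) (checkCnt x (cnt + checkCnt x cnt + 1))]
  else
    decodeA x (cnt + checkCnt x cnt + 1 + checkCnt x (cnt + checkCnt x cnt + 1) + 1)
      (ret ++ [letterA (checkCnt x cnt) (checkCnt x (cnt + checkCnt x cnt + 1))])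
termination_by ((PySem.List.len x) - cnt).toNat
decreasing_by
  simp only [PySem.List.len_eq] at *
  have h0 := checkCnt_nonneg x cnt
  have h1 := checkCnt_nonneg x (cnt + checkCnt x cnt + 1)
  omega

-- getDot: nested search for x in the grid
def getDotRow (row : List Char) (j : Nat) (i : Nat) (x : Char) : Option (List Char) :=
  match row with
  | [] => none
  | ch :: rest =>
      if ch = x then
        some (List.replicate (i + 1) '.' ++ ' ' :: (List.replicate (j + 1) '.' ++ [' ']))
      else getDotRow rest (j + 1) i x

def getDotRows : List (List Char) → Nat → Char → Option (List Char)
  | [], _, _ => none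
  | row :: rest, i, x =>
      match getDotRow row 0 i x with
      | some s => some s
      | none => getDotRows rest (i + 1) x

def getDot (x : Char) : Option (List Char) :=
  let x' := if x = 'k' then 'c' else x
  getDotRows gridA 0 x'

-- encode loop: ret += getDot(i)  (getDot = None raises in Python; excluded by Pre_)
def encodeA (l : List Char) : List Char :=
  l.foldl (fun ret ch => ret ++ (getDot ch).getD []) []

def tap_code (text : String) : String :=
  let l := text.toList
  match PySem.List.pyGet? l 0 with
  | none => ""   -- text[0] raises IndexError on the empty string; excluded by Pre_
  | some c =>
      if c = '.' then String.ofList (decodeA l 0 [])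
      else String.ofList (PySem.List.slice (encodeA l) none (some (-1)))   -- ret[:-1]

-- ===== PORT B =====

def alphaB : List Char :=
  ['a','b','c','d','e','f','g','h','i','j','l','m','n','o','p',
   'q','r','s','t','u','v','w','x','y','z']

-- ALPHABET[5*(len(row)-1) + len(col) - 1]; the index is a Python int, pyGet? is Python's indexing
def letterB (row col : List Char) : Char :=
  (PySem.List.pyGet? alphaB (5 * ((row.length : Int) - 1) + (col.length : Int) - 1)).getD '?'

-- _decode: recursion on the run list, two groups at a time
def decPairsB : List (List Char) → List Char
  | [] => []
  | [_] => []   -- runs[1] raises IndexError in Python here; excluded by Pre_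
  | row :: col :: rest => letterB row col :: decPairsB rest

-- codes = {ALPHABET[5*r+c]: '.'*(r+1) + ' ' + '.'*(c+1) for r in range(5) for c in range(5)}
-- then codes['k'] = codes['c']
def tableB : PySem.Dict Char (List Char) :=
  let t := (PySem.List.pyRange 0 5 1).foldl
    (fun d r => (PySem.List.pyRange 0 5 1).foldl
      (fun d c =>
        PySem.Dict.insert d ((PySem.List.pyGet? alphaB (5 * r + c)).getD '?')
          (List.replicate (r + 1).toNat '.' ++ ' ' :: List.replicate (c + 1).toNat '.'))
      d)
    PySem.Dict.empty
  PySem.Dict.insert t 'k' ((PySem.Dict.get? t 'c').getD [])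

def tap_code_alt (text : String) : String :=
  let l := text.toList
  match PySem.List.pyGet? l 0 with
  | none => ""   -- text[0] raises IndexError on the empty string; excluded by Pre_
  | some c =>
      if c = '.' then
        String.ofList (decPairsB
          (PySem.Chars.split₀ (l.map (fun ch => if ch = '.' then ch else ' '))))
      else
        String.ofList (PySem.Chars.join [' ']
          (l.map fun ch => (PySem.Dict.get? tableB ch).getD []))

-- ===== PRECONDITION & SPEC =====

-- shape of a well-formed tap-code message, read as an automaton over the characters:
-- dot runs of length 1..5 strictly alternating with single separator characters, an even
-- number of runs in total (run counts the current run, k the finished runs)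
def wfA : List Char → Nat → Nat → Bool
  | [], run, k => if run = 0 then k % 2 == 0 else decide (run ≤ 5) && (k + 1) % 2 == 0
  | c :: t, run, k =>
      if c = '.' then decide (run < 5) && wfA t (run + 1) k
      else decide (1 ≤ run) && wfA t 0 (k + 1)

-- Pre_ excludes exactly: the empty string (IndexError on text[0]); decode inputs that are not
-- well-formed tap code — a dot run of length 0 or more than 5 (doubled/stray separators raise
-- IndexError or hit grid[-1] by accidental negative indexing) or a missing final column (A pads
-- it to 0 and returns grid[r-1][-1], B raises) — and encode inputs with a character outside
-- a-z (getDot returns None and A raises TypeError).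
def Pre_tap_code (text : String) : Prop :=
  text.toList ≠ [] ∧
  (if text.toList.headD ' ' = '.'
   then wfA text.toList 0 0 = true
   else ∀ ch ∈ text.toList, ch ∈
     ['a','b','c','d','e','f','g','h','i','j','k','l','m','n','o','p',
      'q','r','s','t','u','v','w','x','y','z'])
instance (text : String) : Decidable (Pre_tap_code text) := by
  unfold Pre_tap_code; infer_instance

def pvWitness_tap_code : String := ".... . .. ..."

def Spec_tap_code (text : String) (out : String) : Prop := out = tap_code_alt text
instance (text : String) (out : String) : Decidable (Spec_tap_code text out) := by
  unfold Spec_tap_code; infer_instance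

-- ===== CLAIM (what is proved, stated in full; the proofs are below) =====
def Claim_equal_tap_code : Prop :=
  ∀ (text : String), Dom_tap_code text → Pre_tap_code text → Spec_tap_code text (tap_code text)

-- ===== LEMMAS AND PROOFS =====

-- length of the leading dot run
def dotRun : List Char → Nat
  | [] => 0
  | c :: t => if c = '.' then dotRun t + 1 else 0

-- shape of a well-formed tap-code message: pairs of dot runs of length 1..5, each run followed
-- by exactly one separator character (the last one optionally bare)
def wfPairs (l : List Char) : Bool :=
  decide (1 ≤ dotRun l ∧ dotRun l ≤ 5) && decide (l.drop (dotRun l) ≠ []) &&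
  decide (1 ≤ dotRun (l.drop (dotRun l + 1)) ∧ dotRun (l.drop (dotRun l + 1)) ≤ 5) &&
  (if _ : (l.drop (dotRun l + 1)).drop (dotRun (l.drop (dotRun l + 1))) = [] then true
   else if _ : (l.drop (dotRun l + 1)).drop (dotRun (l.drop (dotRun l + 1)) + 1) = [] then true
   else wfPairs ((l.drop (dotRun l + 1)).drop (dotRun (l.drop (dotRun l + 1)) + 1)))
termination_by l.length
decreasing_by
  rename_i h1 _h2
  have h4 : dotRun (l.drop (dotRun l + 1)) < (l.drop (dotRun l + 1)).length := by
    by_contra hge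
    exact h1 (List.drop_eq_nil_of_le (by omega))
  simp only [List.length_drop] at h4 ⊢
  omega

-- automaton facts: a run is at most 5 long, and what follows the leading run
theorem wfA_bound : ∀ (l : List Char) (run k : Nat), run ≤ 5 → wfA l run k = true →
    run + dotRun l ≤ 5 := by
  intro l
  induction l with
  | nil =>
      intro run k hrun _
      simp [dotRun]; omega
  | cons c t ih =>
      intro run k hrun h
      by_cases hc : c = '.'
      · subst hc
        simp only [wfA, if_pos] at h
        simp only [Bool.and_eq_true, decide_eq_true_eq] at h
        have := ih (run + 1) k (by omega) h.2
        have hg : dotRun ('.' :: t) = dotRun t + 1 := by simp [dotRun]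
        rw [hg]; omega
      · simp [dotRun, hc]
        omega

theorem wfA_nil_case : ∀ (l : List Char) (run k : Nat), wfA l run k = true →
    l.drop (dotRun l) = [] →
    (run + dotRun l = 0 → k % 2 = 0) ∧ (1 ≤ run + dotRun l → (k + 1) % 2 = 0) := by
  intro l
  induction l with
  | nil =>
      intro run k h _
      simp only [wfA] at h
      by_cases h0 : run = 0
      · rw [if_pos h0] at h
        simp only [beq_iff_eq] at h
        simp [dotRun, h0, h]
      · rw [if_neg h0] at h
        simp only [Bool.and_eq_true, decide_eq_true_eq, beq_iff_eq] at h
        simp [dotRun]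
        constructor <;> intro <;> omega
  | cons c t ih =>
      intro run k h hd
      by_cases hc : c = '.'
      · subst hc
        simp only [dotRun, if_pos, List.drop_succ_cons] at hd ⊢
        simp only [wfA, if_pos, Bool.and_eq_true, decide_eq_true_eq] at h
        have := ih (run + 1) k h.2 hd
        constructor <;> intro <;> omega
      · simp [dotRun, hc] at hd

theorem wfA_cons_case : ∀ (l : List Char) (run k : Nat) (d : Char) (t2 : List Char),
    wfA l run k = true → l.drop (dotRun l) = d :: t2 →
    1 ≤ run + dotRun l ∧ wfA t2 0 (k + 1) = true := by
  intro l
  induction l with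
  | nil => intro run k d t2 _ hd; simp at hd
  | cons c t ih =>
      intro run k d t2 h hd
      by_cases hc : c = '.'
      · subst hc
        simp only [dotRun, if_pos, List.drop_succ_cons] at hd
        simp only [wfA, if_pos, Bool.and_eq_true, decide_eq_true_eq] at h
        have := ih (run + 1) k d t2 h.2 hd
        constructor
        · simp [dotRun]; omega
        · exact this.2
      · simp only [dotRun, if_neg hc, List.drop_zero] at hd
        simp only [wfA, if_neg hc, Bool.and_eq_true, decide_eq_true_eq] at h
        cases hd
        exact ⟨by simp [dotRun, hc]; omega, h.2⟩

-- the automaton accepts only strings of the pair shape wfPairs describes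
theorem wfA_imp_wfPairs : ∀ (n : Nat) (l : List Char), l.length ≤ n → l ≠ [] →
    ∀ (k : Nat), k % 2 = 0 → wfA l 0 k = true → wfPairs l = true := by
  intro n
  induction n with
  | zero =>
      intro l hlen hne _ _ _
      exact absurd (List.eq_nil_of_length_eq_zero (by omega)) hne
  | succ n ih =>
    intro l hlen hne k hk h
    set r : Nat := dotRun l with hrdef
    have hr5 : r ≤ 5 := by have := wfA_bound l 0 k (by omega) h; omega
    obtain ⟨d, t, hdt⟩ : ∃ d t, l.drop r = d :: t := by
      cases hdr : l.drop r with
      | nil =>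
          have h2 := (wfA_nil_case l 0 k h hdr).1
          have h3 := (wfA_nil_case l 0 k h hdr).2
          by_cases hr0 : r = 0
          · -- dotRun l = 0 and drop 0 = [] means l = []
            rw [hr0] at hdr; simp at hdr; exact absurd hdr hne
          · have := h3 (by omega); omega
      | cons d t => exact ⟨d, t, rfl⟩
    obtain ⟨hr1', hwt⟩ := wfA_cons_case l 0 k d t h hdt
    have hr1 : 1 ≤ r := by omega
    have hts1 : t = l.drop (r + 1) := by
      rw [← List.drop_drop, hdt]; rfl
    set s1 : List Char := l.drop (r + 1) with hs1def
    rw [hts1] at hwt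
    set c : Nat := dotRun s1 with hcdef
    have hc5 : c ≤ 5 := by have := wfA_bound s1 0 (k + 1) (by omega) hwt; omega
    have hc1 : 1 ≤ c := by
      by_contra hc0
      have hc0' : c = 0 := by omega
      cases hs1 : s1 with
      | nil =>
          have := (wfA_nil_case s1 0 (k + 1) hwt (by rw [hs1, List.drop_nil])).1
          have hd0 : dotRun s1 = 0 := by rw [hs1]; rfl
          rw [hd0] at this
          omega
      | cons d2 t2 =>
          have hdrop0 : s1.drop (dotRun s1) = d2 :: t2 := by
            have h0 : dotRun s1 = 0 := by rw [← hcdef]; exact hc0'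
            rw [h0, hs1, List.drop_zero]
          have := (wfA_cons_case s1 0 (k + 1) d2 t2 hwt hdrop0).1
          omega
    rw [wfPairs]
    simp only [Bool.and_eq_true, decide_eq_true_eq]
    refine ⟨⟨⟨⟨hr1, hr5⟩, by rw [hdt]; simp⟩, ⟨hc1, hc5⟩⟩, ?_⟩
    rw [← hs1def, ← hcdef]
    by_cases h1 : s1.drop c = []
    · rw [dif_pos h1]
    · rw [dif_neg h1]
      obtain ⟨d2, t2, hdt2⟩ : ∃ d2 t2, s1.drop c = d2 :: t2 := by
        cases hh : s1.drop c with
        | nil => exact absurd hh h1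
        | cons d2 t2 => exact ⟨d2, t2, rfl⟩
      have hdt2' : s1.drop (dotRun s1) = d2 :: t2 := by rw [← hcdef]; exact hdt2
      obtain ⟨_, hwt2⟩ := wfA_cons_case s1 0 (k + 1) d2 t2 hwt hdt2'
      have ht2 : t2 = s1.drop (c + 1) := by
        rw [← List.drop_drop, hdt2]; rfl
      by_cases h2 : s1.drop (c + 1) = []
      · rw [dif_pos h2]
      · rw [dif_neg h2]
        have hlen2 : (s1.drop (c + 1)).length ≤ n := by
          have h3 : s1.length ≤ l.length - (r + 1) := by rw [hs1def]; simp
          have h6 : l.length ≠ 0 := by simpa using hne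
          have h7 : (s1.drop (c + 1)).length = s1.length - (c + 1) := by simp
          omega
        rw [ht2] at hwt2
        exact ih (s1.drop (c + 1)) hlen2 h2 (k + 2) (by omega) hwt2


-- run-length view of the input used as the common reference: run, skip one separator, repeat
def countsRuns (l : List Char) : List Nat :=
  if h : l = [] then []
  else
    let c := dotRun l
    c :: countsRuns (l.drop (c + 1))
termination_by l.length
decreasing_by
  have : l.length ≠ 0 := by simpa using h
  simp; omega

-- A's per-pair letters from the counts list (missing trailing column read as 0, as checkCnt gives)
def pairsN : List Nat → List Char
  | [] => []
  | [r] => [letterA r 0]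
  | r :: c :: t => letterA r c :: pairsN t

theorem checkCntAux_shift (x : List Char) (is : List Int) (r : Int) :
    checkCntAux x is r = r + checkCntAux x is 0 := by
  induction is generalizing r with
  | nil => simp [checkCntAux]
  | cons i is ih =>
      simp only [checkCntAux]
      split
      · rw [ih (r + 1), ih (0 + 1)]; ring
      · simp

theorem checkCnt_eq_dotRun (x : List Char) : ∀ (n : Nat) (c : Int), 0 ≤ c →
    x.length - c.toNat = n → checkCnt x c = (dotRun (x.drop c.toNat) : Int) := by
  intro n
  induction n using Nat.strong_induction_on with
  | _ n ih =>
    intro c hc hn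
    unfold checkCnt
    by_cases hlt : c < (x.length : Int)
    · rw [PySem.List.pyRange_one_cons (by simpa [PySem.List.len_eq] using hlt)]
      have hcn : c.toNat < x.length := by omega
      have hget : PySem.List.pyGet? x c = some x[c.toNat] :=
        PySem.List.pyGet?_eq_some_getElem x hc (by simpa [PySem.List.len_eq] using hlt)
      have hdrop : x.drop c.toNat = x[c.toNat] :: x.drop (c.toNat + 1) :=
        List.drop_eq_getElem_cons hcn
      rw [hdrop]
      simp only [checkCntAux, hget]
      by_cases hch : x[c.toNat] = '.'
      · rw [if_pos (by rw [hch]), checkCntAux_shift]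
        have h1 : checkCntAux x (PySem.List.pyRange (c + 1) (PySem.List.len x) 1) 0
            = checkCnt x (c + 1) := rfl
        rw [h1, ih (x.length - (c+1).toNat) (by omega) (c+1) (by omega) rfl]
        have h2 : (c + 1).toNat = c.toNat + 1 := by omega
        rw [h2]
        simp [dotRun, hch]; omega
      · rw [if_neg (by simp [hch]), dotRun, if_neg hch]
        simp
    · rw [PySem.List.pyRange_one_eq_nil (by simp [PySem.List.len_eq]; omega)]
      rw [List.drop_eq_nil_of_le (by omega)]
      simp [checkCntAux, dotRun]

theorem countsRuns_nil : countsRuns [] = [] := by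
  rw [countsRuns]; simp

theorem countsRuns_cons (l : List Char) (h : l ≠ []) :
    countsRuns l = dotRun l :: countsRuns (l.drop (dotRun l + 1)) := by
  rw [countsRuns]; simp [h]

-- A's while-loop produces exactly the pairwise letters of the run-length list
theorem decodeA_eq (x : List Char) :
    ∀ (n : Nat) (cnt : Int) (ret : List Char), 0 ≤ cnt → cnt < (x.length : Int) →
      x.length - cnt.toNat = n →
      decodeA x cnt ret = ret ++ pairsN (countsRuns (x.drop cnt.toNat)) := by
  intro n
  induction n using Nat.strong_induction_on with
  | _ n ih =>
    intro cnt ret hc hlt hn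
    have hr0 : checkCnt x cnt = (dotRun (x.drop cnt.toNat) : Int) :=
      checkCnt_eq_dotRun x _ cnt hc rfl
    set r0 : Nat := dotRun (x.drop cnt.toNat) with hr0def
    have hc1 : (0:Int) ≤ cnt + checkCnt x cnt + 1 := by rw [hr0]; omega
    have hc1n : (cnt + checkCnt x cnt + 1).toNat = cnt.toNat + (r0 + 1) := by
      rw [hr0]; omega
    have hr1 : checkCnt x (cnt + checkCnt x cnt + 1)
        = (dotRun (x.drop (cnt + checkCnt x cnt + 1).toNat) : Int) :=
      checkCnt_eq_dotRun x _ _ hc1 rfl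
    set r1 : Nat := dotRun (x.drop (cnt + checkCnt x cnt + 1).toNat) with hr1def
    have hdd : (x.drop cnt.toNat).drop (r0 + 1) = x.drop (cnt + checkCnt x cnt + 1).toNat := by
      rw [List.drop_drop, hc1n, Nat.add_comm]
    have hs0 : x.drop cnt.toNat ≠ [] := by
      intro h
      have := List.drop_eq_nil_iff.mp h
      omega
    have hcount0 : countsRuns (x.drop cnt.toNat)
        = r0 :: countsRuns (x.drop (cnt + checkCnt x cnt + 1).toNat) := by
      rw [countsRuns_cons _ hs0, ← hr0def, hdd]
    have hlet : letterA (checkCnt x cnt) (checkCnt x (cnt + checkCnt x cnt + 1))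
        = letterA r0 r1 := by rw [hr1, hr0]
    rw [decodeA]
    by_cases hend : PySem.List.len x ≤ cnt + checkCnt x cnt + 1
        + checkCnt x (cnt + checkCnt x cnt + 1) + 1
    · rw [if_pos hend]
      rw [hcount0]
      by_cases hs1 : x.drop (cnt + checkCnt x cnt + 1).toNat = []
      · have hr1z : r1 = 0 := by rw [hr1def, hs1]; rfl
        rw [hs1, countsRuns_nil]
        simp only [pairsN]
        rw [hlet, hr1z]
        norm_num
      · rw [countsRuns_cons _ hs1, ← hr1def]
        have hc2n : ((x.drop (cnt + checkCnt x cnt + 1).toNat).drop (r1 + 1)) = [] := by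
          rw [List.drop_drop]
          apply List.drop_eq_nil_of_le
          simp only [PySem.List.len_eq] at hend
          rw [hr1, hr0] at hend
          omega
        rw [hc2n, countsRuns_nil]
        simp only [pairsN]
        rw [hlet]
    · rw [if_neg hend]
      simp only [PySem.List.len_eq] at hend
      have hc2 : (0:Int) ≤ cnt + checkCnt x cnt + 1 + checkCnt x (cnt + checkCnt x cnt + 1) + 1 := by
        rw [hr1, hr0]; omega
      have hc2lt : cnt + checkCnt x cnt + 1 + checkCnt x (cnt + checkCnt x cnt + 1) + 1
          < (x.length : Int) := by omega
      have hc2n : (cnt + checkCnt x cnt + 1 + checkCnt x (cnt + checkCnt x cnt + 1) + 1).toNat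
          = cnt.toNat + (r0 + 1) + (r1 + 1) := by
        rw [hr1, hr0]; omega
      rw [ih (x.length - (cnt + checkCnt x cnt + 1 + checkCnt x (cnt + checkCnt x cnt + 1) + 1).toNat)
            (by rw [hc2n]; omega) _ _ hc2 hc2lt rfl]
      have hs1 : x.drop (cnt + checkCnt x cnt + 1).toNat ≠ [] := by
        intro h
        have := List.drop_eq_nil_iff.mp h
        rw [hc1n] at this
        rw [hr1, hr0] at hc2lt
        omega
      rw [hcount0, countsRuns_cons _ hs1, ← hr1def]
      have hdd2 : (x.drop (cnt + checkCnt x cnt + 1).toNat).drop (r1 + 1)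
          = x.drop (cnt + checkCnt x cnt + 1 + checkCnt x (cnt + checkCnt x cnt + 1) + 1).toNat := by
        rw [List.drop_drop, hc1n, hc2n]
      rw [hdd2]
      simp only [pairsN]
      rw [hlet, List.append_assoc]
      rfl

-- dot-run structure lemmas
theorem dotRun_take_drop (l : List Char) :
    l = List.replicate (dotRun l) '.' ++ l.drop (dotRun l) := by
  induction l with
  | nil => simp [dotRun]
  | cons a t ih =>
      by_cases ha : a = '.'
      · subst ha
        simp only [dotRun, if_true]
        exact congrArg _ ih
      · simp [dotRun, ha]

theorem dotRun_drop_head (l : List Char) (d : Char) (t : List Char)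
    (h : l.drop (dotRun l) = d :: t) : d ≠ '.' := by
  induction l with
  | nil => simp at h
  | cons a s ih =>
      by_cases ha : a = '.'
      · subst ha
        simp only [dotRun, if_true] at h
        exact ih h
      · simp only [dotRun, if_neg ha, List.drop_zero] at h
        cases h; simpa using ha

-- split₀ unfolding lemmas (about PySem.Chars.split₀.go, specialised to our masked strings)
theorem split0_go_acc (s : List Char) : ∀ (cur : List Char) (acc : List (List Char)),
    PySem.Chars.split₀.go s cur acc = acc.reverse ++ PySem.Chars.split₀.go s cur [] := by
  induction s with
  | nil =>
      intro cur acc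
      simp only [PySem.Chars.split₀.go]
      by_cases hcur : cur.isEmpty
      · simp [hcur]
      · simp [hcur]
  | cons c rest ih =>
      intro cur acc
      simp only [PySem.Chars.split₀.go]
      by_cases hsp : PySem.Chars.isspace c
      · simp only [hsp, if_true]
        by_cases hcur : cur.isEmpty
        · simp only [hcur, if_true]
          exact ih [] acc
        · simp only [hcur, Bool.false_eq_true, if_false]
          rw [ih [] (cur.reverse :: acc), ih [] [cur.reverse]]
          simp
      · simp only [hsp, Bool.false_eq_true, if_false]
        exact ih (c :: cur) acc

theorem split0_go_dots (r : Nat) : ∀ (rest cur : List Char) (acc : List (List Char)),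
    PySem.Chars.split₀.go (List.replicate r '.' ++ rest) cur acc
      = PySem.Chars.split₀.go rest (List.replicate r '.' ++ cur) acc := by
  induction r with
  | zero => simp
  | succ k ih =>
      intro rest cur acc
      rw [List.replicate_succ, List.cons_append]
      simp only [PySem.Chars.split₀.go]
      rw [if_neg (by decide)]
      rw [ih rest ('.' :: cur) acc]
      congr 1
      rw [List.append_cons, ← List.replicate_succ', List.replicate_succ, List.cons_append]

theorem split0_dots_sep (r : Nat) (hr : 1 ≤ r) (rest : List Char) :
    PySem.Chars.split₀ (List.replicate r '.' ++ ' ' :: rest)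
      = List.replicate r '.' :: PySem.Chars.split₀ rest := by
  unfold PySem.Chars.split₀
  rw [split0_go_dots r (' ' :: rest) [] []]
  simp only [PySem.Chars.split₀.go]
  rw [if_pos (by decide)]
  rw [if_neg (by cases r with | zero => omega | succ k => simp)]
  rw [split0_go_acc]
  simp

theorem split0_dots (r : Nat) (hr : 1 ≤ r) :
    PySem.Chars.split₀ (List.replicate r '.') = [List.replicate r '.'] := by
  unfold PySem.Chars.split₀
  rw [← List.append_nil (List.replicate r '.'), split0_go_dots r [] [] []]
  simp only [PySem.Chars.split₀.go]
  rw [if_neg (by cases r with | zero => omega | succ k => simp)]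
  simp

-- the mask step of B: dots stay, everything else becomes a space
theorem mask_replicate (r : Nat) :
    (List.replicate r '.').map (fun ch => if ch = '.' then ch else ' ')
      = List.replicate r '.' := by
  simp

theorem mask_sep_cons (d : Char) (hd : d ≠ '.') (s : List Char) :
    (d :: s).map (fun ch => if ch = '.' then ch else ' ')
      = ' ' :: s.map (fun ch => if ch = '.' then ch else ' ') := by
  simp [hd]

-- the two letter computations agree on runs of length 1..5
theorem letter_eq (r c : Nat) (hr1 : 1 ≤ r) (hr5 : r ≤ 5) (hc1 : 1 ≤ c) (hc5 : c ≤ 5) :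
    letterA (r : Int) (c : Int)
      = (PySem.List.pyGet? alphaB (5 * ((r : Int) - 1) + (c : Int) - 1)).getD '?' := by
  interval_cases r <;> interval_cases c <;> rfl

-- main bridge: on well-formed input, B's split-and-pair letters are A's pairwise letters
theorem bridge : ∀ (n : Nat) (l : List Char), l.length ≤ n → wfPairs l = true →
    decPairsB (PySem.Chars.split₀ (l.map (fun ch => if ch = '.' then ch else ' ')))
      = pairsN (countsRuns l) := by
  intro n
  induction n with
  | zero =>
      intro l hlen hwf
      rw [wfPairs] at hwf
      have hl : l = [] := List.eq_nil_of_length_eq_zero (by omega)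
      subst hl
      simp [dotRun] at hwf
  | succ n ih =>
    intro l hlen hwf
    rw [wfPairs] at hwf
    simp only [Bool.and_eq_true, decide_eq_true_eq] at hwf
    obtain ⟨⟨⟨hr, hdr⟩, hc⟩, htail⟩ := hwf
    set r : Nat := dotRun l with hrdef
    set s1 : List Char := l.drop (r + 1) with hs1def
    set c : Nat := dotRun s1 with hcdef
    obtain ⟨d, t, hdt⟩ : ∃ d t, l.drop r = d :: t := by
      cases h : l.drop r with
      | nil => exact absurd h hdr
      | cons d t => exact ⟨d, t, rfl⟩
    have hdnd : d ≠ '.' := dotRun_drop_head l d t hdt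
    have hts1 : t = s1 := by
      rw [hs1def, ← List.drop_drop, hdt]; rfl
    have hldec : l = List.replicate r '.' ++ d :: s1 := by
      conv_lhs => rw [dotRun_take_drop l]
      rw [← hrdef, hdt, hts1]
    have hlne : l ≠ [] := by
      intro h; rw [h] at hdt; simp at hdt
    have hcnt : countsRuns l = r :: countsRuns s1 := by
      rw [countsRuns_cons l hlne, ← hrdef, ← hs1def]
    have hmask : l.map (fun ch => if ch = '.' then ch else ' ')
        = List.replicate r '.' ++ ' ' :: s1.map (fun ch => if ch = '.' then ch else ' ') := by
      rw [hldec, List.map_append, mask_replicate, mask_sep_cons d hdnd]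
    rw [hmask, split0_dots_sep r hr.1]
    by_cases h1 : s1.drop c = []
    · -- no separator after the final column
      have hs1rep : s1 = List.replicate c '.' := by
        conv_lhs => rw [dotRun_take_drop s1]
        rw [← hcdef, h1, List.append_nil]
      have hs1ne : s1 ≠ [] := by
        rw [hs1rep]; intro h; simp at h; omega
      have hdropnil : s1.drop (c + 1) = [] := by
        apply List.drop_eq_nil_of_le; rw [hs1rep]; simp
      have hcnt1 : countsRuns s1 = [c] := by
        rw [countsRuns_cons s1 hs1ne, ← hcdef, hdropnil, countsRuns_nil]
      rw [hs1rep, mask_replicate, split0_dots c hc.1]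
      simp only [decPairsB, hcnt, hcnt1, pairsN, List.length_replicate, letterB]
      rw [letter_eq r c hr.1 hr.2 hc.1 hc.2]
    · rw [dif_neg h1] at htail
      obtain ⟨d2, t2, hdt2⟩ : ∃ d2 t2, s1.drop c = d2 :: t2 := by
        cases h : s1.drop c with
        | nil => exact absurd h h1
        | cons d2 t2 => exact ⟨d2, t2, rfl⟩
      have hd2nd : d2 ≠ '.' := dotRun_drop_head s1 d2 t2 hdt2
      have ht2 : t2 = s1.drop (c + 1) := by
        rw [← List.drop_drop, hdt2]; rfl
      have hs1dec : s1 = List.replicate c '.' ++ d2 :: s1.drop (c + 1) := by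
        conv_lhs => rw [dotRun_take_drop s1]
        rw [← hcdef, hdt2, ht2]
      have hs1ne : s1 ≠ [] := by
        intro h; rw [h] at hdt2; simp at hdt2
      have hcnt1 : countsRuns s1 = c :: countsRuns (s1.drop (c + 1)) := by
        rw [countsRuns_cons s1 hs1ne, ← hcdef]
      have hmask1 : s1.map (fun ch => if ch = '.' then ch else ' ')
          = List.replicate c '.' ++ ' ' ::
              (s1.drop (c + 1)).map (fun ch => if ch = '.' then ch else ' ') := by
        conv_lhs => rw [hs1dec]
        rw [List.map_append, mask_replicate, mask_sep_cons d2 hd2nd]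
      rw [hmask1, split0_dots_sep c hc.1]
      by_cases h2 : s1.drop (c + 1) = []
      · rw [h2]
        have h0 : PySem.Chars.split₀
            (([] : List Char).map (fun ch => if ch = '.' then ch else ' ')) = [] := rfl
        rw [h0]
        simp only [decPairsB, hcnt, hcnt1, h2, countsRuns_nil, pairsN,
          List.length_replicate, letterB]
        rw [letter_eq r c hr.1 hr.2 hc.1 hc.2]
      · rw [dif_neg h2] at htail
        have hlen2 : (s1.drop (c + 1)).length ≤ n := by
          have h3 : s1.length ≤ l.length - (r + 1) := by
            rw [hs1def]; simp
          have h4 : (s1.drop (c + 1)).length ≤ s1.length - (c + 1) := by simp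
          have h5 : s1 ≠ [] := hs1ne
          have h6 : s1.length ≠ 0 := by simpa using h5
          omega
        simp only [decPairsB, hcnt, hcnt1, pairsN, List.length_replicate, letterB]
        rw [letter_eq r c hr.1 hr.2 hc.1 hc.2, ih (s1.drop (c + 1)) hlen2 htail]

-- encode side: each admitted character's getDot value is its table entry plus a space
set_option maxRecDepth 100000 in
theorem getDot_eq : ∀ ch ∈
    ['a','b','c','d','e','f','g','h','i','j','k','l','m','n','o','p',
     'q','r','s','t','u','v','w','x','y','z'],
    getDot ch = some ((PySem.Dict.get? tableB ch).getD [] ++ [' ']) ∧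
    (PySem.Dict.get? tableB ch).getD [] ≠ [] := by
  intro ch hch
  fin_cases hch <;> exact ⟨by decide, by decide⟩

theorem dropLast_flatMap_join (f : Char → List Char) :
    ∀ (chs : List Char), (∀ ch ∈ chs, f ch ≠ []) →
      (chs.flatMap (fun ch => f ch ++ [' '])).dropLast =
        PySem.Chars.join [' '] (chs.map f) := by
  intro chs
  induction chs with
  | nil => simp [PySem.Chars.join_nil]
  | cons a t ih =>
      intro h
      cases t with
      | nil =>
          simp [PySem.Chars.join_singleton]
      | cons b t' =>
          have hne : ((b :: t').flatMap (fun ch => f ch ++ [' '])) ≠ [] := by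
            simp
          rw [List.flatMap_cons, List.map_cons, List.map_cons,
              PySem.Chars.join_cons_cons,
              List.dropLast_append_of_ne_nil hne,
              ih (fun ch hch => h ch (List.mem_cons_of_mem a hch))]
          simp

theorem encodeA_eq_flatMap (l : List Char) :
    encodeA l = l.flatMap (fun ch => (getDot ch).getD []) := by
  unfold encodeA
  rw [PySem.List.foldl_append_eq_flatMap]
  simp

-- ===== VERDICT (by name: the statement is the Claim_ definition above) =====
theorem tap_code_spec : Claim_equal_tap_code := by
  intro text hdom hpre
  obtain ⟨hne, hif⟩ := hpre
  unfold Spec_tap_code tap_code tap_code_alt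
  cases hl : text.toList with
  | nil => exact absurd hl hne
  | cons a t =>
    rw [hl] at hif
    simp only [List.headD_cons] at hif
    simp only [PySem.List.pyGet?_zero_cons]
    by_cases ha : a = '.'
    · simp only [if_pos ha] at hif ⊢
      have hwf : wfPairs (a :: t) = true :=
        wfA_imp_wfPairs (a :: t).length (a :: t) (le_refl _) (by simp) 0 rfl hif
      have hd := decodeA_eq (a :: t) (a :: t).length 0 []
        (le_refl 0) (by simp) rfl
      simp only [Int.toNat_zero, List.drop_zero, List.nil_append] at hd
      rw [hd, ← bridge (a :: t).length (a :: t) (le_refl _) hwf]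
    · simp only [if_neg ha] at hif ⊢
      rw [encodeA_eq_flatMap]
      have hflat : (a :: t).flatMap (fun ch => (getDot ch).getD [])
          = (a :: t).flatMap
              (fun ch => (PySem.Dict.get? tableB ch).getD [] ++ [' ']) := by
        rw [List.flatMap_def, List.flatMap_def,
          List.map_congr_left (fun ch hch => by
            rw [(getDot_eq ch (hif ch hch)).1])]
        simp only [Option.getD_some]
      rw [hflat, PySem.List.slice_to_neg_one,
          dropLast_flatMap_join _ (a :: t)
            (fun ch hch => (getDot_eq ch (hif ch hch)).2)]
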